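-- pv_equiv track=rewrite | github.com/komtaki/atCoder | contest_abc/153/d.py | solve
-- ===== SOURCE A (Python) =====
-- def solve(H):
--     ans_attack = 0
--     hp = H
--     enemy = 1
--
--     while hp > 1:
--         hp = hp // 2
--         ans_attack = ans_attack + enemy
--         enemy = enemy * 2
--
--     return ans_attack + enemy
-- ===== SOURCE B (Python) =====
-- def solve(H):
--     if H <= 1:
--         return 1
--     return 2 ** H.bit_length() - 1
-- ===== Notes on version B (the rewrite author's own statement) =====
-- stated objective: simpler
-- what changed: Replaced the halving loop accumulating geometric attack counts with the closed form 2**H.bit_length() - 1 (A's loop never runs for H <= 1, where both return 1).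
import Mathlib
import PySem

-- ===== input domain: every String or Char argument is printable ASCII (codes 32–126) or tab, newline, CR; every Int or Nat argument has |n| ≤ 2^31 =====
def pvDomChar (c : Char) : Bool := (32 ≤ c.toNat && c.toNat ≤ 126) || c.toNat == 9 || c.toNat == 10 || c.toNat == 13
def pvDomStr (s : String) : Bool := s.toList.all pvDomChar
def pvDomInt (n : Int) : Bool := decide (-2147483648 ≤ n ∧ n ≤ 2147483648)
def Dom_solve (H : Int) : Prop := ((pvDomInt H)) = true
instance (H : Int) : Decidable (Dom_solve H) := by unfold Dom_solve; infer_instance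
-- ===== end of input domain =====

-- B replaces A's halving loop by the closed form 2^bit_length(H) - 1 (objective: simpler).

-- ===== PORT A =====
-- while hp > 1: hp //= 2; ans += enemy; enemy *= 2   — literal loop as recursion on hp
def solveLoop (hp ans enemy : Int) : Int :=
  if h : 1 < hp then
    solveLoop (PySem.Int.floordiv hp 2) (ans + enemy) (enemy * 2)
  else
    ans + enemy
termination_by hp.toNat
decreasing_by
  have h2 : PySem.Int.floordiv hp 2 = hp / 2 := PySem.Int.floordiv_eq_ediv_of_pos (by omega)
  rw [h2]; omega

def solve (H : Int) : Int := solveLoop H 0 1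

-- ===== PORT B =====
-- H.bit_length() for H ≥ 2 is Nat.log2 H.toNat + 1 (exact: floor(log2 H)+1 on positive ints)
def solve_alt (H : Int) : Int :=
  if H ≤ 1 then 1 else 2 ^ (Nat.log2 H.toNat + 1) - 1

-- ===== PRECONDITION & SPEC =====
def Spec_solve (H : Int) (out : Int) : Prop := out = solve_alt H
instance (H : Int) (out : Int) : Decidable (Spec_solve H out) := by unfold Spec_solve; infer_instance

-- ===== CLAIM (what is proved, stated in full; the proofs are below) =====
def Claim_equal_solve : Prop := ∀ (H : Int), Dom_solve H → Spec_solve H (solve H)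

-- ===== LEMMAS AND PROOFS =====

-- Loop invariant: on a positive natural hp, the loop returns ans + enemy * (2^bitlen(hp) - 1).
theorem solveLoop_nat (n : Nat) (hn : 1 ≤ n) :
    ∀ ans enemy : Int,
      solveLoop (n : Int) ans enemy = ans + enemy * (2 ^ (Nat.log2 n + 1) - 1) := by
  induction n using Nat.strong_induction_on with
  | _ n ih =>
    intro ans enemy
    by_cases h2 : 2 ≤ n
    · rw [solveLoop]
      have hlt : (1 : Int) < (n : Int) := by exact_mod_cast h2
      rw [dif_pos hlt]
      have hfd : PySem.Int.floordiv (n : Int) 2 = ((n / 2 : Nat) : Int) := by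
        exact_mod_cast PySem.Int.floordiv_natCast n 2
      rw [hfd, ih (n / 2) (by omega) (by omega) (ans + enemy) (enemy * 2)]
      have hlog : Nat.log2 n = Nat.log2 (n / 2) + 1 := by
        rw [Nat.log2_eq_log_two, Nat.log2_eq_log_two, Nat.log_div_base]
        have := Nat.log_pos (by norm_num : 1 < 2) h2
        omega
      rw [hlog]; ring
    · have hn1 : n = 1 := by omega
      subst hn1
      rw [solveLoop]
      have h1 : Nat.log2 1 = 0 := by rw [Nat.log2_eq_log_two]; simp
      rw [dif_neg (by norm_num), h1]; ring

-- ===== VERDICT (by name: the statement is the Claim_ definition above) =====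
theorem solve_spec : Claim_equal_solve := by
  intro H _
  unfold Spec_solve solve solve_alt
  by_cases hle : H ≤ 1
  · rw [if_pos hle, solveLoop, dif_neg (by omega)]; norm_num
  · rw [if_neg hle]
    have hH : H = ((H.toNat : Nat) : Int) := by omega
    rw [hH, solveLoop_nat H.toNat (by omega)]
    simp only [Int.toNat_natCast]
    ring
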